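-- pv_equiv track=rewrite | github.com/helenawsu/ZeroWaste-VehicleRouting | data_parser/extract_saturday_landfill.py | _line_centers_from_positions
-- ===== SOURCE A (Python) =====
-- from typing import List, Tuple, Optional, Any
--
-- def _line_centers_from_positions(positions: List[int], gap: int = 5) -> List[int]:
--     """Cluster nearby positions into line centers; return center of each cluster."""
--     if not positions:
--         return []
--     positions = sorted(set(positions))
--     clusters: List[Tuple[int, int]] = []
--     cluster = [positions[0]]
--     for i in range(1, len(positions)):
--         if positions[i] - positions[i - 1] <= gap:
--             cluster.append(positions[i])
--         else:
--             clusters.append((min(cluster), max(cluster)))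
--             cluster = [positions[i]]
--     if cluster:
--         clusters.append((min(cluster), max(cluster)))
--     return [(c[0] + c[1]) // 2 for c in clusters]
-- ===== SOURCE B (Python) =====
-- def _line_centers_from_positions(positions, gap=5):
--     """Cluster nearby positions into line centers; return center of each cluster."""
--     pts = sorted(set(positions))
--     if not pts:
--         return []
--     breaks = [i for i in range(1, len(pts)) if pts[i] - pts[i - 1] > gap]
--     starts = [pts[0]] + [pts[i] for i in breaks]
--     ends = [pts[i - 1] for i in breaks] + [pts[-1]]
--     return [(s + e) // 2 for s, e in zip(starts, ends)]
-- ===== Notes on version B (the rewrite author's own statement) =====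
-- stated objective: alternative
-- what changed: Replaces A's single-pass growing-cluster accumulation (mutable cluster list closed with min/max) by a staged decomposition: one comprehension collects the break indices where the gap is exceeded, two derived lists give each segment's start and end, and the centers come from zipping starts with ends.
import Mathlib
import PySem

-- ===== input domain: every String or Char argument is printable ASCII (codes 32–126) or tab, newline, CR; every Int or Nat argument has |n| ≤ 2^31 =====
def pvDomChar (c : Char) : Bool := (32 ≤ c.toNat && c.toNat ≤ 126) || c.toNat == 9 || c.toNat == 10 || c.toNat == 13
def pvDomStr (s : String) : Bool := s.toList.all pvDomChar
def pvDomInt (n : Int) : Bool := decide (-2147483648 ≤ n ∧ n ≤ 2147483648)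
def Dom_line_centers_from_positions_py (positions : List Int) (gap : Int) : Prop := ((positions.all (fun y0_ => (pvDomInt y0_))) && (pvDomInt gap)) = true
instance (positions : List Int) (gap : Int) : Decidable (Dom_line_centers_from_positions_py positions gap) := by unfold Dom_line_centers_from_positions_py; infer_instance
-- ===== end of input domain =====

-- B replaces A's single-pass growing-cluster accumulation (mutable cluster closed with min/max)
-- by a staged decomposition: collect break indices, derive segment starts and ends, zip for centers.


-- ===== PORT A =====
-- loop body of A's for-loop (state = (clusters, cluster)); min()/max() on the nonempty
-- cluster are PySem.List.min?/max? (the .getD 0 default is never taken: cluster ≠ []).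
def pvStepA (pts : List Int) (gap : Int) (st : List (Int × Int) × List Int) (i : Int) :
    List (Int × Int) × List Int :=
  if PySem.List.pyGetD pts i 0 - PySem.List.pyGetD pts (i - 1) 0 ≤ gap then
    (st.1, st.2 ++ [PySem.List.pyGetD pts i 0])
  else
    (st.1 ++ [((PySem.List.min? st.2 (fun x => x)).getD 0, (PySem.List.max? st.2 (fun x => x)).getD 0)],
     [PySem.List.pyGetD pts i 0])

def line_centers_from_positions_py (positions : List Int) (gap : Int) : List Int :=
  if positions = [] then []
  else
    let pts := PySem.List.sorted (PySem.Set.ofList positions) (fun x => x) false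
    let st := (PySem.List.pyRange 1 (pts.length : Int) 1).foldl (pvStepA pts gap)
      ([], [PySem.List.pyGetD pts 0 0])
    let clusters :=
      if st.2 = [] then st.1
      else st.1 ++ [((PySem.List.min? st.2 (fun x => x)).getD 0, (PySem.List.max? st.2 (fun x => x)).getD 0)]
    clusters.map (fun c => PySem.Int.floordiv (c.1 + c.2) 2)

-- ===== PORT B =====
-- B: breaks = [i for i in range(1,len) if pts[i]-pts[i-1] > gap]; starts/ends derived from
-- breaks; centers = [(s+e)//2 for s,e in zip(starts, ends)].
def line_centers_from_positions_py_alt (positions : List Int) (gap : Int) : List Int :=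
  let pts := PySem.List.sorted (PySem.Set.ofList positions) (fun x => x) false
  if pts = [] then []
  else
    let breaks := (PySem.List.pyRange 1 (pts.length : Int) 1).filter
      (fun i => decide (gap < PySem.List.pyGetD pts i 0 - PySem.List.pyGetD pts (i - 1) 0))
    let starts := PySem.List.pyGetD pts 0 0 :: breaks.map (fun i => PySem.List.pyGetD pts i 0)
    let ends := breaks.map (fun i => PySem.List.pyGetD pts (i - 1) 0) ++ [PySem.List.pyGetD pts (-1) 0]
    (starts.zip ends).map (fun p => PySem.Int.floordiv (p.1 + p.2) 2)

-- ===== PRECONDITION & SPEC =====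
def Spec_line_centers_from_positions_py (positions : List Int) (gap : Int) (out : List Int) : Prop := out = line_centers_from_positions_py_alt positions gap
instance (positions : List Int) (gap : Int) (out : List Int) : Decidable (Spec_line_centers_from_positions_py positions gap out) := by unfold Spec_line_centers_from_positions_py; infer_instance

-- ===== CLAIM (what is proved, stated in full; the proofs are below) =====
def Claim_equal_line_centers_from_positions_py : Prop := ∀ (positions : List Int) (gap : Int), Dom_line_centers_from_positions_py positions gap → Spec_line_centers_from_positions_py positions gap (line_centers_from_positions_py positions gap)

-- ===== LEMMAS AND PROOFS =====

-- B's zipped-centers expression, parameterised by the segment start, the remaining break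
-- indices and the final endpoint (proof-only abbreviation of B's starts/ends/zip stage)
def pvZ (pts : List Int) (first : Int) (bs : List Int) (lastv : Int) : List Int :=
  ((first :: bs.map (fun i => PySem.List.pyGetD pts i 0)).zip
    (bs.map (fun i => PySem.List.pyGetD pts (i - 1) 0) ++ [lastv])).map
    (fun p => PySem.Int.floordiv (p.1 + p.2) 2)

theorem pvZ_nil (pts : List Int) (first lastv : Int) :
    pvZ pts first [] lastv = [PySem.Int.floordiv (first + lastv) 2] := rfl

theorem pvZ_cons (pts : List Int) (first lastv b : Int) (bs : List Int) :
    pvZ pts first (b :: bs) lastv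
      = PySem.Int.floordiv (first + PySem.List.pyGetD pts (b - 1) 0) 2
        :: pvZ pts (PySem.List.pyGetD pts b 0) bs lastv := by
  simp [pvZ]

-- a fold of min over elements all ≥ a stays a
theorem pv_foldl_min_of_le (t : List Int) (a : Int) (h : ∀ y ∈ t, a ≤ y) :
    t.foldl min a = a := by
  induction t with
  | nil => rfl
  | cons b t ih =>
      have hab : a ≤ b := h b (by simp)
      simp [min_eq_left hab]
      exact ih (fun y hy => h y (by simp [hy]))

-- Python min of a ≤-sorted nonempty list is its head
theorem pv_min_pairwise (cl : List Int) (a : Int) (hp : cl.Pairwise (· ≤ ·))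
    (hh : cl.head? = some a) : (PySem.List.min? cl (fun x => x)).getD 0 = a := by
  cases cl with
  | nil => simp at hh
  | cons x t =>
      simp at hh; subst hh
      rw [PySem.List.min?_id_cons]
      simp [pv_foldl_min_of_le t x (by simpa using (List.pairwise_cons.mp hp).1)]

-- every element of a ≤-sorted list is ≤ its last element
theorem pv_pairwise_le_getLast (cl : List Int) (b : Int) (hp : cl.Pairwise (· ≤ ·))
    (hl : cl.getLast? = some b) : ∀ a ∈ cl, a ≤ b := by
  induction cl with
  | nil => simp at hl
  | cons x t ih =>
      intro a ha
      cases t with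
      | nil =>
          simp at hl ha; omega
      | cons y t' =>
          rw [List.getLast?_cons_cons] at hl
          rcases List.mem_cons.mp ha with rfl | ha'
          · have hy : a ≤ y := (List.pairwise_cons.mp hp).1 y (by simp)
            have := ih (List.pairwise_cons.mp hp).2 hl y (by simp)
            omega
          · exact ih (List.pairwise_cons.mp hp).2 hl a ha'

-- a fold of max along a ≤-sorted chain reaches the last element
theorem pv_foldl_max_pairwise (t : List Int) (a : Int) (hp : (a :: t).Pairwise (· ≤ ·)) :
    t.foldl max a = (a :: t).getLast (by simp) := by
  induction t generalizing a with
  | nil => rfl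
  | cons b t' ih =>
      have hab : a ≤ b := (List.pairwise_cons.mp hp).1 b (by simp)
      have := ih b (List.pairwise_cons.mp hp).2
      simp only [List.foldl_cons, max_eq_right hab]
      rw [this, List.getLast_cons_cons]

-- Python max of a ≤-sorted nonempty list is its last element
theorem pv_max_pairwise (cl : List Int) (b : Int) (hp : cl.Pairwise (· ≤ ·))
    (hl : cl.getLast? = some b) : (PySem.List.max? cl (fun x => x)).getD 0 = b := by
  cases cl with
  | nil => simp at hl
  | cons x t =>
      rw [PySem.List.max?_id_cons]
      have h2 := pv_foldl_max_pairwise t x hp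
      rw [List.getLast?_eq_some_getLast (by simp)] at hl
      have h3 := Option.some.inj hl
      simp [h2, h3]

-- pts.getD is monotone on a ≤-sorted list
theorem pv_getD_mono (pts : List Int) (hp : pts.Pairwise (· ≤ ·)) (i j : Nat)
    (hij : i ≤ j) (hj : j < pts.length) : pts.getD i 0 ≤ pts.getD j 0 := by
  rcases Nat.eq_or_lt_of_le hij with rfl | hlt
  · omega
  · have := (List.pairwise_iff_getElem.mp hp) i j (by omega) hj hlt
    rw [List.getD_eq_getElem pts 0 (by omega), List.getD_eq_getElem pts 0 hj]
    exact this

-- MAIN INVARIANT: after A has accumulated 'cl' (= the current segment, ≤-sorted, starting at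
-- 'first' and ending at pts[i-1]), finishing A's loop from index i and post-processing equals
-- the already-emitted centers plus B's zipped centers over the breaks still ahead of i.
theorem pv_main (pts : List Int) (gap : Int) (hp : pts.Pairwise (· ≤ ·)) :
    ∀ (k i : Nat) (cs : List (Int × Int)) (cl : List Int) (first : Int),
      k = pts.length - i → 1 ≤ i → i ≤ pts.length →
      cl.head? = some first → cl.getLast? = some (pts.getD (i - 1) 0) → cl.Pairwise (· ≤ ·) →
      (let st := (PySem.List.pyRange (i : Int) (pts.length : Int) 1).foldl (pvStepA pts gap) (cs, cl)
       (if st.2 = [] then st.1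
        else st.1 ++ [((PySem.List.min? st.2 (fun x => x)).getD 0, (PySem.List.max? st.2 (fun x => x)).getD 0)]).map
         (fun c => PySem.Int.floordiv (c.1 + c.2) 2))
      = cs.map (fun c => PySem.Int.floordiv (c.1 + c.2) 2)
        ++ pvZ pts first
            ((PySem.List.pyRange (i : Int) (pts.length : Int) 1).filter
              (fun j => decide (gap < PySem.List.pyGetD pts j 0 - PySem.List.pyGetD pts (j - 1) 0)))
            (pts.getD (pts.length - 1) 0) := by
  intro k
  induction k with
  | zero =>
      intro i cs cl first hk h1 hn hh hl hcl
      have hin : i = pts.length := by omega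
      rw [hin]
      rw [PySem.List.pyRange_one_eq_nil (by omega)]
      simp only [List.foldl_nil, List.filter_nil, pvZ_nil]
      have hne : cl ≠ [] := by intro h; simp [h] at hh
      simp only [hne, if_false, List.map_append, List.map_cons, List.map_nil,
        pv_min_pairwise cl first hcl hh,
        pv_max_pairwise cl _ hcl (by rw [hl, hin])]
  | succ k ih =>
      intro i cs cl first hk h1 hn hh hl hcl
      have hin : i < pts.length := by omega
      have hne : cl ≠ [] := by intro h; simp [h] at hh
      have hcast : ((i : Int) - 1) = ((i - 1 : Nat) : Int) := by omega
      rw [PySem.List.pyRange_one_cons (by exact_mod_cast hin)]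
      simp only [List.foldl_cons, List.filter_cons]
      by_cases hC : pts.getD i 0 - pts.getD (i - 1) 0 ≤ gap
      · -- gap small: A extends the cluster, i is not a break
        have hstep : pvStepA pts gap (cs, cl) (i : Int) = (cs, cl ++ [pts.getD i 0]) := by
          unfold pvStepA
          rw [hcast, PySem.List.pyGetD_natCast, PySem.List.pyGetD_natCast]
          rw [if_pos hC]
        have hcond : ¬ (gap < PySem.List.pyGetD pts (i : Int) 0 - PySem.List.pyGetD pts ((i : Int) - 1) 0) := by
          rw [hcast, PySem.List.pyGetD_natCast, PySem.List.pyGetD_natCast]; omega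
        rw [hstep]
        simp only [hcond, decide_false, if_false, Bool.false_eq_true]
        have hprev_le : pts.getD (i - 1) 0 ≤ pts.getD i 0 := pv_getD_mono pts hp _ _ (by omega) hin
        have hle : ∀ a ∈ cl, a ≤ pts.getD i 0 := fun a ha => by
          have := pv_pairwise_le_getLast cl _ hcl hl a ha; omega
        have hcast2 : ((i : Int) + 1) = ((i + 1 : Nat) : Int) := by omega
        rw [hcast2]
        refine ih (i + 1) cs (cl ++ [pts.getD i 0]) first (by omega) (by omega) (by omega) ?_ ?_ ?_
        · rw [List.head?_append]
          simp [hh]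
        · simp
        · rw [List.pairwise_append]
          exact ⟨hcl, by simp, fun a ha b hb => by simp at hb; subst hb; exact hle a ha⟩
      · -- gap exceeded: A closes the cluster, i is a break, B's zip emits the same center
        have hstep : pvStepA pts gap (cs, cl) (i : Int)
            = (cs ++ [(first, pts.getD (i - 1) 0)], [pts.getD i 0]) := by
          unfold pvStepA
          rw [hcast, PySem.List.pyGetD_natCast, PySem.List.pyGetD_natCast]
          rw [if_neg hC]
          rw [pv_min_pairwise cl first hcl hh, pv_max_pairwise cl _ hcl hl]
        have hcond : gap < PySem.List.pyGetD pts (i : Int) 0 - PySem.List.pyGetD pts ((i : Int) - 1) 0 := by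
          rw [hcast, PySem.List.pyGetD_natCast, PySem.List.pyGetD_natCast]; omega
        rw [hstep]
        simp only [hcond, decide_true, if_true]
        rw [pvZ_cons]
        have hcast2 : ((i : Int) + 1) = ((i + 1 : Nat) : Int) := by omega
        rw [hcast2]
        have hIH := ih (i + 1) (cs ++ [(first, pts.getD (i - 1) 0)]) [pts.getD i 0] (pts.getD i 0)
          (by omega) (by omega) (by omega) (by simp) (by simp) (by simp)
        simp only [List.map_append, List.map_cons, List.map_nil] at hIH
        rw [hIH]
        rw [hcast, PySem.List.pyGetD_natCast, PySem.List.pyGetD_natCast]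
        simp

-- ===== VERDICT (by name: the statement is the Claim_ definition above) =====
theorem line_centers_from_positions_py_spec : Claim_equal_line_centers_from_positions_py := by
  intro positions gap _
  unfold Spec_line_centers_from_positions_py
  unfold line_centers_from_positions_py line_centers_from_positions_py_alt
  by_cases hpos : positions = []
  · subst hpos
    simp [PySem.List.sorted, PySem.Set.ofList]
  · simp only [hpos, if_false]
    set pts := PySem.List.sorted (PySem.Set.ofList positions) (fun x => x) false with hpts
    have hp : pts.Pairwise (· ≤ ·) :=
      (PySem.List.sorted_ofList_pairwise_lt (xs := positions)).imp (fun h => le_of_lt h)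
    have hne : pts ≠ [] := by
      rw [hpts, Ne, PySem.List.sorted_eq_nil_iff]
      intro h
      cases positions with
      | nil => exact hpos rfl
      | cons p r =>
          have : p ∈ PySem.Set.ofList (p :: r) := by
            rw [PySem.Set.mem_ofList]; simp
          rw [h] at this; simp at this
    have hlen : 1 ≤ pts.length := by
      have := List.length_pos_of_ne_nil hne; omega
    simp only [hne, if_false]
    have hmain := pv_main pts gap hp (pts.length - 1) 1 [] [pts.getD 0 0] (pts.getD 0 0)
      rfl (by omega) hlen (by simp) (by simp) (by simp)
    simp only [Nat.cast_one, List.map_nil, List.nil_append] at hmain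
    have hlast : PySem.List.pyGetD pts (-1) 0 = pts.getD (pts.length - 1) 0 := by
      rw [PySem.List.pyGetD_neg_one pts 0 hne, List.getLast_eq_getElem,
          List.getD_eq_getElem pts 0 (by omega)]
    rw [PySem.List.pyGetD_zero, hmain]
    simp only [pvZ, hlast]
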